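-- pv_equiv track=rewrite | github.com/ShimShining/wheat | race/prac/algo/interview/hw/coor_move.py | coor_move
-- ===== SOURCE A (Python) =====
-- def coor_move(ins):
--     s = ins.split(";")
--     d = {
--         "A": (-1, 0),    # (-1, 0)  负方向移动,移动的索引是0
--         "D": (1, 0),
--         "W": (1, 1),
--         "S": (-1, 1)
--     }
--     origin = [0, 0]
--     for c in s:
--         if not c or len(c) < 2 or c[0] not in "ADWS" or not c[1:].isdigit():
--             continue
--         else:
--             index = d[c[0]][1]
--             origin[index] += (d[c[0]][0] * int(c[1:]))
--     return tuple(origin)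
-- ===== SOURCE B (Python) =====
-- def coor_move(ins):
--     x = y = 0
--     state = 0      # 0 = at token start, 1 = head seen & valid so far, 2 = token invalid
--     h = ''
--     buf = ''
--     for ch in ins:
--         if ch == ';':
--             if state == 1 and buf:
--                 n = int(buf)
--                 if h == 'A':
--                     x -= n
--                 elif h == 'D':
--                     x += n
--                 elif h == 'W':
--                     y += n
--                 else:
--                     y -= n
--             state, buf = 0, ''
--         elif state == 0:
--             h = ch
--             state = 1 if ch in 'ADWS' else 2
--         elif state == 1:
--             if '0' <= ch <= '9':
--                 buf += ch
--             else:
--                 state = 2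
--     if state == 1 and buf:
--         n = int(buf)
--         if h == 'A':
--             x -= n
--         elif h == 'D':
--             x += n
--         elif h == 'W':
--             y += n
--         else:
--             y -= n
--     return (x, y)
-- ===== Notes on version B (the rewrite author's own statement) =====
-- stated objective: alternative
-- what changed: Replaces A's split-then-per-token pass (slice c[1:], isdigit, dict lookup, mutated [x,y] cell) with a single character-level finite-state scan over the raw string: a 3-state DFA (token start / valid head / invalid) that buffers digit characters and finalizes one move at each separator and at end of input, never calling split or isdigit.
import Mathlib
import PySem

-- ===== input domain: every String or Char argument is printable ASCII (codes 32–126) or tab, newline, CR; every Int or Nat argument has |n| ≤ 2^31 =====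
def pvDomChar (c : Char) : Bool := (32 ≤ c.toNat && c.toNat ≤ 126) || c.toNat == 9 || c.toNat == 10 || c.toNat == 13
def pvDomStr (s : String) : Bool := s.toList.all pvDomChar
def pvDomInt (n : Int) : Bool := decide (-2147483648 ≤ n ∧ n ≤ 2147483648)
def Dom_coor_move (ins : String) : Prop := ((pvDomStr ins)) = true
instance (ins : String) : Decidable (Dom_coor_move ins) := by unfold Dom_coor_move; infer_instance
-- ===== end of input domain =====

-- B replaces A's split-then-per-token pass with a single character-level 3-state scan
-- (token start / valid head / invalid token) that buffers digit characters and finalizes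
-- one move at each separator and at end of input (alternative decomposition, same cost).

-- ===== PORT A =====
-- A's per-instruction loop body: skip invalid tokens, else look the head up in the
-- direction dict and add sign*int(rest) into the coordinate picked by the dict's index.
-- ('c[0] in "ADWS"' is substring membership of the 1-char string c[0], ported as
--  Chars.isIn of the singleton in the literal char list of "ADWS".)
def coorStepA (origin : Int × Int) (c : List Char) : Int × Int :=
  if c = [] || decide (c.length < 2) || !(PySem.Chars.isIn [c.headI] ['A', 'D', 'W', 'S'])
      || !(PySem.Chars.strIsdigit (c.drop 1)) then
    origin
  else
    -- d[c[0]]: the dict literal of A, keyed by the (single) first character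
    let dv : Int × Int :=
      PySem.Dict.getD
        (PySem.Dict.ofList [('A', ((-1 : Int), (0 : Int))), ('D', (1, 0)), ('W', (1, 1)), ('S', (-1, 1))])
        c.headI (0, 0)
    -- int(c[1:]) is guarded by isdigit, so ofChars? is some here; getD 0 is never taken
    let n : Int := (PySem.Int.ofChars? (c.drop 1)).getD 0
    if dv.2 = 0 then (origin.1 + dv.1 * n, origin.2) else (origin.1, origin.2 + dv.1 * n)

def coor_move (ins : String) : Int × Int :=
  (PySem.Chars.splitOn ins.toList [';']).foldl coorStepA (0, 0)

-- ===== PORT B =====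
-- the shared finalization if/elif chain of Source B ('if h == 'A': x -= n …')
def bApply (h : Char) (n x y : Int) : Int × Int :=
  if h = 'A' then (x - n, y)
  else if h = 'D' then (x + n, y)
  else if h = 'W' then (x, y + n)
  else (x, y - n)

-- one step of Source B's character loop over the DFA state (x, y, state, h, buf)
def bStep (st : Int × Int × Nat × Char × List Char) (ch : Char) : Int × Int × Nat × Char × List Char :=
  let (x, y, state, h, buf) := st
  if ch = ';' then
    if state = 1 ∧ buf ≠ [] then
      let n : Int := (PySem.Int.ofChars? buf).getD 0   -- int(buf); buf holds only digits here
      let p := bApply h n x y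
      (p.1, p.2, 0, h, [])
    else (x, y, 0, h, [])
  else if state = 0 then
    (x, y, if PySem.Chars.isIn [ch] ['A', 'D', 'W', 'S'] then 1 else 2, ch, buf)
  else if state = 1 then
    if decide ('0' ≤ ch) && decide (ch ≤ '9') then (x, y, 1, h, buf ++ [ch])
    else (x, y, 2, h, buf)
  else st

-- the trailing finalize after the loop of Source B
def bFinal (st : Int × Int × Nat × Char × List Char) : Int × Int :=
  let (x, y, state, h, buf) := st
  if state = 1 ∧ buf ≠ [] then bApply h ((PySem.Int.ofChars? buf).getD 0) x y
  else (x, y)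

def coor_move_alt (ins : String) : Int × Int :=
  bFinal (ins.toList.foldl bStep (0, 0, 0, ' ', []))

-- ===== PRECONDITION & SPEC =====
def Spec_coor_move (ins : String) (out : Int × Int) : Prop := out = coor_move_alt ins
instance (ins : String) (out : Int × Int) : Decidable (Spec_coor_move ins out) := by unfold Spec_coor_move; infer_instance

-- ===== CLAIM (what is proved, stated in full; the proofs are below) =====
def Claim_equal_coor_move : Prop := ∀ (ins : String), Dom_coor_move ins → Spec_coor_move ins (coor_move ins)

-- ===== LEMMAS AND PROOFS =====

-- prepend t to the first piece of a split (proof-side helper)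
def consHead (t : List Char) : List (List Char) → List (List Char)
  | [] => [t]
  | a :: r => (t ++ a) :: r

-- structural characterization of s.split(";") on char lists
def mySplit : List Char → List (List Char)
  | [] => [[]]
  | c :: rest => if c = ';' then [] :: mySplit rest else consHead [c] (mySplit rest)

theorem mySplit_ne_nil (cs : List Char) : mySplit cs ≠ [] := by
  cases cs with
  | nil => simp [mySplit]
  | cons c rest =>
    simp only [mySplit]
    split
    · simp
    · cases h : mySplit rest <;> simp [consHead]

theorem consHead_nil_of_ne (l : List (List Char)) (h : l ≠ []) : consHead [] l = l := by
  cases l with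
  | nil => exact absurd rfl h
  | cons a r => simp [consHead]

theorem consHead_consHead (t c : List Char) (l : List (List Char)) :
    consHead t (consHead c l) = consHead (t ++ c) l := by
  cases l <;> simp [consHead]

theorem splitOn_go_eq (fuel : Nat) : ∀ (l cur : List Char) (acc : List (List Char)),
    l.length ≤ fuel →
    PySem.Chars.splitOn.go [';'] fuel l cur acc = acc.reverse ++ consHead cur.reverse (mySplit l) := by
  induction fuel with
  | zero =>
    intro l cur acc hl
    have : l = [] := by cases l <;> simp_all
    subst this
    simp [PySem.Chars.splitOn.go, mySplit, consHead]
  | succ fuel ih =>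
    intro l cur acc hl
    cases l with
    | nil => simp [PySem.Chars.splitOn.go, mySplit, consHead]
    | cons c rest =>
      by_cases hc : c = ';'
      · subst hc
        have hgo : PySem.Chars.splitOn.go [';'] (fuel+1) (';' :: rest) cur acc
            = PySem.Chars.splitOn.go [';'] fuel rest [] (cur.reverse :: acc) := by
          simp [PySem.Chars.splitOn.go, List.isPrefixOf]
        rw [hgo, ih rest [] (cur.reverse :: acc) (by simpa using Nat.lt_succ_iff.mp (by simpa using hl))]
        simp only [List.reverse_nil]
        rw [consHead_nil_of_ne _ (mySplit_ne_nil rest)]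
        simp [mySplit, consHead]
      · have hgo : PySem.Chars.splitOn.go [';'] (fuel+1) (c :: rest) cur acc
            = PySem.Chars.splitOn.go [';'] fuel rest (c :: cur) acc := by
          simp [PySem.Chars.splitOn.go, List.isPrefixOf]
          exact fun h => absurd h.symm hc
        rw [hgo, ih rest (c :: cur) acc (by simpa using Nat.lt_succ_iff.mp (by simpa using hl))]
        simp [mySplit, hc, consHead_consHead]

theorem splitOn_eq (cs : List Char) : PySem.Chars.splitOn cs [';'] = mySplit cs := by
  unfold PySem.Chars.splitOn
  rw [splitOn_go_eq (cs.length + 1) cs [] [] (by omega)]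
  simp [consHead_nil_of_ne _ (mySplit_ne_nil cs)]

theorem isIn_single (c : Char) (l : List Char) : PySem.Chars.isIn [c] l = decide (c ∈ l) := by
  by_cases h : c ∈ l
  · have h1 : PySem.Chars.isIn [c] l = true := by
      rw [PySem.Chars.isIn_iff_infix]
      obtain ⟨s, t, rfl⟩ := List.append_of_mem h
      exact ⟨s, t, by simp⟩
    simp [h1, h]
  · have h1 : PySem.Chars.isIn [c] l = false := by
      rw [PySem.Chars.isIn_eq_false_iff]
      intro hinf
      exact h (hinf.subset (by simp))
    simp [h1, h]

theorem takeWhile_append_all (p : Char → Bool) (ds r : List Char) (h : ds.all p = true) :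
    (ds ++ r).takeWhile p = ds ++ r.takeWhile p := by
  induction ds with
  | nil => simp
  | cons d ds ih =>
    simp only [List.all_cons, Bool.and_eq_true] at h
    simp [h.1, ih h.2]

theorem takeWhile_append_notall (p : Char → Bool) (ds r : List Char) (h : ds.all p = false) :
    (ds ++ r).takeWhile p = ds.takeWhile p := by
  induction ds with
  | nil => simp at h
  | cons d ds ih =>
    simp only [List.all_cons, Bool.and_eq_false_iff] at h
    rcases h with h | h
    · simp [h]
    · by_cases hd : p d
      · simp [hd, ih h]
      · simp [hd]

-- abstract DFA state reached after scanning the ';'-free partial token t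
def stOf (x y : Int) (h0 : Char) (t : List Char) : Int × Int × Nat × Char × List Char :=
  match t with
  | [] => (x, y, 0, h0, [])
  | c :: ds =>
    if c ∈ (['A', 'D', 'W', 'S'] : List Char) then
      if ds.all PySem.Chars.isdigit then (x, y, 1, c, ds)
      else (x, y, 2, c, ds.takeWhile PySem.Chars.isdigit)
    else (x, y, 2, c, [])

theorem dictA : PySem.Dict.getD
    (PySem.Dict.ofList [('A', ((-1 : Int), (0 : Int))), ('D', (1, 0)), ('W', (1, 1)), ('S', (-1, 1))])
    'A' (0, 0) = ((-1 : Int), (0 : Int)) := by decide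

theorem dictD : PySem.Dict.getD
    (PySem.Dict.ofList [('A', ((-1 : Int), (0 : Int))), ('D', (1, 0)), ('W', (1, 1)), ('S', (-1, 1))])
    'D' (0, 0) = ((1 : Int), (0 : Int)) := by decide

theorem dictW : PySem.Dict.getD
    (PySem.Dict.ofList [('A', ((-1 : Int), (0 : Int))), ('D', (1, 0)), ('W', (1, 1)), ('S', (-1, 1))])
    'W' (0, 0) = ((1 : Int), (1 : Int)) := by decide

theorem dictS : PySem.Dict.getD
    (PySem.Dict.ofList [('A', ((-1 : Int), (0 : Int))), ('D', (1, 0)), ('W', (1, 1)), ('S', (-1, 1))])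
    'S' (0, 0) = ((-1 : Int), (1 : Int)) := by decide

theorem bFinal_stOf (x y : Int) (h0 : Char) (t : List Char) :
    bFinal (stOf x y h0 t) = coorStepA (x, y) t := by
  cases t with
  | nil => simp [stOf, bFinal, coorStepA]
  | cons c ds =>
    by_cases hmem : c ∈ (['A', 'D', 'W', 'S'] : List Char)
    · by_cases hall : ds.all PySem.Chars.isdigit
      · cases ds with
        | nil =>
          simp [stOf, bFinal, coorStepA, hmem]
        | cons d ds' =>
          have hbf : bFinal (x, y, 1, c, d :: ds')
              = bApply c ((PySem.Int.ofChars? (d :: ds')).getD 0) x y := by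
            simp [bFinal]
          have hguard : ((c :: d :: ds') = [] || decide ((c :: d :: ds').length < 2)
              || !(PySem.Chars.isIn [(c :: d :: ds').headI] ['A', 'D', 'W', 'S'])
              || !(PySem.Chars.strIsdigit ((c :: d :: ds').drop 1))) = false := by
            simp [isIn_single, hmem, PySem.Chars.strIsdigit, hall]
          simp only [stOf, if_pos hmem, if_pos hall, hbf]
          rw [coorStepA, hguard]
          simp only [Bool.false_eq_true, if_false, List.headI, List.drop_one, List.tail_cons]
          fin_cases hmem <;>
            simp [bApply, dictA, dictD, dictW, dictS, Prod.mk.injEq] <;> ring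
      · have hguard : ((c :: ds) = [] || decide ((c :: ds).length < 2)
            || !(PySem.Chars.isIn [(c :: ds).headI] ['A', 'D', 'W', 'S'])
            || !(PySem.Chars.strIsdigit ((c :: ds).drop 1))) = true := by
          simp [PySem.Chars.strIsdigit, hall]
        simp only [stOf, if_pos hmem, if_neg hall]
        simp [bFinal, coorStepA]
        intro _ _ hdig
        rw [PySem.Chars.strIsdigit] at hdig
        simp at hdig
        exact absurd (List.all_eq_true.mpr hdig.2) hall
    · have hguard : ((c :: ds) = [] || decide ((c :: ds).length < 2)
          || !(PySem.Chars.isIn [(c :: ds).headI] ['A', 'D', 'W', 'S'])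
          || !(PySem.Chars.strIsdigit ((c :: ds).drop 1))) = true := by
        simp [isIn_single, hmem]
      simp only [stOf, if_neg hmem]
      simp [bFinal, coorStepA]
      intro _ hin _
      rw [isIn_single] at hin
      simp at hin
      exact absurd (by simpa using hin) hmem

theorem bStep_semi (st : Int × Int × Nat × Char × List Char) :
    bStep st ';' = ((bFinal st).1, (bFinal st).2, 0, st.2.2.2.1, []) := by
  obtain ⟨x, y, s, h, buf⟩ := st
  by_cases h1 : s = 1 ∧ buf ≠ []
  · simp [bStep, bFinal, h1]
  · simp [bStep, bFinal, h1]

theorem stOf_step (x y : Int) (h0 : Char) (t : List Char) (c : Char) (hc : c ≠ ';') :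
    bStep (stOf x y h0 t) c = stOf x y h0 (t ++ [c]) := by
  cases t with
  | nil =>
    simp only [stOf, bStep, if_neg hc, List.nil_append]
    by_cases hmem : c ∈ (['A', 'D', 'W', 'S'] : List Char) <;>
      simp [isIn_single, hmem]
  | cons c0 ds =>
    by_cases hmem : c0 ∈ (['A', 'D', 'W', 'S'] : List Char)
    · by_cases hall : ds.all PySem.Chars.isdigit
      · by_cases hdig : PySem.Chars.isdigit c
        · have hall' : (ds ++ [c]).all PySem.Chars.isdigit = true := by
            simp [List.all_append, hall, hdig]
          simp [stOf, hmem, hall, hall', bStep, hc, PySem.Chars.isdigit] at hdig ⊢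
          simp [hdig]
        · have hall' : (ds ++ [c]).all PySem.Chars.isdigit = false := by
            simp [List.all_append, hdig]
          have htw : (ds ++ [c]).takeWhile PySem.Chars.isdigit = ds := by
            rw [takeWhile_append_all _ _ _ hall]
            simp [hdig]
          have htest : (decide ('0' ≤ c) && decide (c ≤ '9')) = false := by
            rw [show (decide ('0' ≤ c) && decide (c ≤ '9')) = PySem.Chars.isdigit c from rfl]
            simpa using hdig
          simp [stOf, hmem, hall, hall', htw, bStep, hc, htest]
      · have hall' : (ds ++ [c]).all PySem.Chars.isdigit = false := by
          simp [List.all_append, hall]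
        have htw : (ds ++ [c]).takeWhile PySem.Chars.isdigit
            = ds.takeWhile PySem.Chars.isdigit := takeWhile_append_notall _ _ _ (by simpa using hall)
        simp [stOf, hmem, hall, hall', htw, bStep, hc]
    · simp [stOf, hmem, bStep, hc]

theorem scan (cs : List Char) : ∀ (x y : Int) (h0 : Char) (t : List Char), ';' ∉ t →
    bFinal (cs.foldl bStep (stOf x y h0 t)) = (consHead t (mySplit cs)).foldl coorStepA (x, y) := by
  induction cs with
  | nil =>
    intro x y h0 t ht
    simp [mySplit, consHead, bFinal_stOf]
  | cons c cs ih =>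
    intro x y h0 t ht
    by_cases hc : c = ';'
    · subst hc
      rw [List.foldl_cons, bStep_semi, bFinal_stOf]
      have hst : ((coorStepA (x, y) t).1, (coorStepA (x, y) t).2, 0, (stOf x y h0 t).2.2.2.1, ([] : List Char))
          = stOf (coorStepA (x, y) t).1 (coorStepA (x, y) t).2 ((stOf x y h0 t).2.2.2.1) [] := rfl
      rw [hst, ih _ _ _ [] (by simp)]
      rw [consHead_nil_of_ne _ (mySplit_ne_nil cs)]
      simp [mySplit, consHead]
    · have ht' : ';' ∉ t ++ [c] := by
        intro hmem
        rcases List.mem_append.mp hmem with h | h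
        · exact ht h
        · simp at h; exact hc h.symm
      rw [List.foldl_cons, stOf_step _ _ _ _ _ hc, ih _ _ _ _ ht']
      simp [mySplit, hc, consHead_consHead]

-- ===== VERDICT (by name: the statement is the Claim_ definition above) =====
theorem coor_move_spec : Claim_equal_coor_move := by
  intro ins _
  unfold Spec_coor_move coor_move coor_move_alt
  rw [splitOn_eq]
  have h := scan ins.toList 0 0 ' ' [] (by simp)
  rw [show ((0, 0, 0, ' ', []) : Int × Int × Nat × Char × List Char) = stOf 0 0 ' ' [] from rfl,
    h, consHead_nil_of_ne _ (mySplit_ne_nil ins.toList)]
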